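-- pv_equiv track=rewrite | github.com/qpwoeirut/CMIMC_Programming2023 | twomaze/submission/2_carnegie.py | calculate_visited
-- ===== SOURCE A (Python) =====
-- def calculate_visited(movements: list[str]) -> tuple[set[tuple[int, int]], set[tuple[int, int]]]:
--     carnegie_visited = set()
--     mellon_visited = set()
--
--     x, y = 0, 0
--     for movement in movements:
--         if movement == 'L':
--             mellon_visited.add((x, y))
--             x -= 1
--         elif movement == 'R':
--             carnegie_visited.add((x, y))
--             x += 1
--         elif movement == 'D':
--             carnegie_visited.add((x, y))
--             y -= 1
--         elif movement == 'U':
--             carnegie_visited.add((x, y))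
--             y += 1
--     return carnegie_visited, mellon_visited
-- ===== SOURCE B (Python) =====
-- def calculate_visited(movements):
--     delta = {'L': (-1, 0), 'R': (1, 0), 'D': (0, -1), 'U': (0, 1)}
--     positions = []
--     cur = (0, 0)
--     for m in movements:
--         positions.append(cur)
--         dx, dy = delta.get(m, (0, 0))
--         cur = (cur[0] + dx, cur[1] + dy)
--     carnegie = {p for p, m in zip(positions, movements) if m in ('R', 'D', 'U')}
--     mellon = {p for p, m in zip(positions, movements) if m == 'L'}
--     return carnegie, mellon
-- ===== Notes on version B (the rewrite author's own statement) =====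
-- stated objective: alternative
-- what changed: B replaces A's single incremental loop (position + two sets updated together) by a build-then-classify decomposition: first a trajectory table of positions-before-each-move via a delta dict, then two comprehensions over zip(positions, movements) building each set.
import Mathlib
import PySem

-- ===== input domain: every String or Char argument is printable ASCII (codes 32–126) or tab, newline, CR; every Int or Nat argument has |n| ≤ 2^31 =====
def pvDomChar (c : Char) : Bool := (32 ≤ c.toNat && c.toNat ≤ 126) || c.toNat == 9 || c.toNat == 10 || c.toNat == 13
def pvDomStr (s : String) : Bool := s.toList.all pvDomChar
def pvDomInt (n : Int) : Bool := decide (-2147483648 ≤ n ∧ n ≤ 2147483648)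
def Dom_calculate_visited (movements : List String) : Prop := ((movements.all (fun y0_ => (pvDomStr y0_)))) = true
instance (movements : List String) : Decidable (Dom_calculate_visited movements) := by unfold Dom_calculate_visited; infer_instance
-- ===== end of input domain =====

-- B rebuilds the same sets by a build-trajectory-then-classify decomposition instead of A's single incremental loop (objective: alternative).

-- ===== PORT A =====
-- loop body of A: state = (carnegie, mellon, x, y)
def pvStepA (st : PySem.Set (Int × Int) × PySem.Set (Int × Int) × Int × Int) (movement : String) :
    PySem.Set (Int × Int) × PySem.Set (Int × Int) × Int × Int :=
  match st with
  | (c, mel, x, y) =>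
    if movement = "L" then (c, mel.add (x, y), x - 1, y)
    else if movement = "R" then (c.add (x, y), mel, x + 1, y)
    else if movement = "D" then (c.add (x, y), mel, x, y - 1)
    else if movement = "U" then (c.add (x, y), mel, x, y + 1)
    else (c, mel, x, y)

def calculate_visited (movements : List String) : (List (Int × Int)) × (List (Int × Int)) :=
  let st := movements.foldl pvStepA (([] : PySem.Set (Int × Int)), ([] : PySem.Set (Int × Int)), (0 : Int), (0 : Int))
  (st.1, st.2.1)

-- ===== PORT B =====
-- delta.get(m, (0, 0)) on the literal move table
def pvDelta (m : String) : Int × Int :=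
  PySem.Dict.getD (PySem.Dict.ofList [("L", ((-1 : Int), (0 : Int))), ("R", (1, 0)), ("D", (0, -1)), ("U", (0, 1))]) m (0, 0)

-- loop body building the trajectory: state = (positions, cur)
def pvStepPos (st : List (Int × Int) × (Int × Int)) (m : String) : List (Int × Int) × (Int × Int) :=
  let d := pvDelta m
  (st.1 ++ [st.2], (st.2.1 + d.1, st.2.2 + d.2))

-- set-comprehension bodies over zip(positions, movements)
def pvAddC (s : PySem.Set (Int × Int)) (pm : (Int × Int) × String) : PySem.Set (Int × Int) :=
  if pm.2 = "R" ∨ pm.2 = "D" ∨ pm.2 = "U" then s.add pm.1 else s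

def pvAddM (s : PySem.Set (Int × Int)) (pm : (Int × Int) × String) : PySem.Set (Int × Int) :=
  if pm.2 = "L" then s.add pm.1 else s

def calculate_visited_alt (movements : List String) : (List (Int × Int)) × (List (Int × Int)) :=
  let st := movements.foldl pvStepPos (([] : List (Int × Int)), ((0 : Int), (0 : Int)))
  let positions := st.1
  let carnegie := (positions.zip movements).foldl pvAddC ([] : PySem.Set (Int × Int))
  let mellon := (positions.zip movements).foldl pvAddM ([] : PySem.Set (Int × Int))
  (carnegie, mellon)

-- ===== PRECONDITION & SPEC =====
def Spec_calculate_visited (movements : List String) (out : (List (Int × Int)) × (List (Int × Int))) : Prop := out = calculate_visited_alt movements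
instance (movements : List String) (out : (List (Int × Int)) × (List (Int × Int))) : Decidable (Spec_calculate_visited movements out) := by unfold Spec_calculate_visited; infer_instance

-- ===== CLAIM (what is proved, stated in full; the proofs are below) =====
def Claim_equal_calculate_visited : Prop := ∀ (movements : List String), Dom_calculate_visited movements → Spec_calculate_visited movements (calculate_visited movements)

-- ===== LEMMAS AND PROOFS =====

-- positions-before-each-move starting at p, and the endpoint
def pvStep (p : Int × Int) (m : String) : Int × Int := (p.1 + (pvDelta m).1, p.2 + (pvDelta m).2)

def pvTraj (p : Int × Int) : List String → List (Int × Int)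
  | [] => []
  | m :: ms => p :: pvTraj (pvStep p m) ms

def pvEnd (p : Int × Int) (ms : List String) : Int × Int := ms.foldl pvStep p

lemma pvDelta_L : pvDelta "L" = (-1, 0) := by decide
lemma pvDelta_R : pvDelta "R" = (1, 0) := by decide
lemma pvDelta_D : pvDelta "D" = (0, -1) := by decide
lemma pvDelta_U : pvDelta "U" = (0, 1) := by decide

lemma pvDelta_other (m : String) (hL : m ≠ "L") (hR : m ≠ "R") (hD : m ≠ "D") (hU : m ≠ "U") :
    pvDelta m = (0, 0) := by
  unfold pvDelta
  rw [show (PySem.Dict.ofList [("L", ((-1 : Int), (0 : Int))), ("R", (1, 0)), ("D", (0, -1)), ("U", (0, 1))]) =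
      (⟨[("L", ((-1 : Int), (0 : Int))), ("R", (1, 0)), ("D", (0, -1)), ("U", (0, 1))]⟩ : PySem.Dict String (Int × Int)) from by decide]
  have h1 : ("L" == m) = false := beq_eq_false_iff_ne.mpr (Ne.symm hL)
  have h2 : ("R" == m) = false := beq_eq_false_iff_ne.mpr (Ne.symm hR)
  have h3 : ("D" == m) = false := beq_eq_false_iff_ne.mpr (Ne.symm hD)
  have h4 : ("U" == m) = false := beq_eq_false_iff_ne.mpr (Ne.symm hU)
  simp [PySem.Dict.getD, PySem.Dict.get?, List.find?, h1, h2, h3, h4]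

lemma pvFoldB (ms : List String) : ∀ (ps : List (Int × Int)) (cur : Int × Int),
    ms.foldl pvStepPos (ps, cur) = (ps ++ pvTraj cur ms, pvEnd cur ms) := by
  induction ms with
  | nil => intro ps cur; simp [pvTraj, pvEnd]
  | cons m ms ih =>
      intro ps cur
      simp only [List.foldl_cons]
      rw [show pvStepPos (ps, cur) m = (ps ++ [cur], pvStep cur m) from rfl, ih]
      simp [pvTraj, pvEnd]

lemma pvFoldA (ms : List String) : ∀ (c mel : PySem.Set (Int × Int)) (p : Int × Int),
    ms.foldl pvStepA (c, mel, p.1, p.2) =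
      (((pvTraj p ms).zip ms).foldl pvAddC c, ((pvTraj p ms).zip ms).foldl pvAddM mel,
        (pvEnd p ms).1, (pvEnd p ms).2) := by
  induction ms with
  | nil => intro c mel p; simp [pvTraj, pvEnd]
  | cons m ms ih =>
      intro c mel p
      simp only [List.foldl_cons, pvTraj, List.zip_cons_cons]
      by_cases hL : m = "L"
      · subst hL
        rw [show pvStepA (c, mel, p.1, p.2) "L" = (c, mel.add (p.1, p.2), p.1 - 1, p.2) from rfl]
        rw [show (p.1 - 1, p.2) = ((pvStep p "L").1, (pvStep p "L").2) by
              simp [pvStep, pvDelta_L]; ring]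
        rw [ih]
        simp [pvAddC, pvAddM, pvEnd, pvStep, pvDelta_L]
      by_cases hR : m = "R"
      · subst hR
        rw [show pvStepA (c, mel, p.1, p.2) "R" = (c.add (p.1, p.2), mel, p.1 + 1, p.2) from rfl]
        rw [show (p.1 + 1, p.2) = ((pvStep p "R").1, (pvStep p "R").2) by
              simp [pvStep, pvDelta_R]]
        rw [ih]
        simp [pvAddC, pvAddM, pvEnd, pvStep, pvDelta_R]
      by_cases hD : m = "D"
      · subst hD
        rw [show pvStepA (c, mel, p.1, p.2) "D" = (c.add (p.1, p.2), mel, p.1, p.2 - 1) from rfl]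
        rw [show (p.1, p.2 - 1) = ((pvStep p "D").1, (pvStep p "D").2) by
              simp [pvStep, pvDelta_D]; ring]
        rw [ih]
        simp [pvAddC, pvAddM, pvEnd, pvStep, pvDelta_D]
      by_cases hU : m = "U"
      · subst hU
        rw [show pvStepA (c, mel, p.1, p.2) "U" = (c.add (p.1, p.2), mel, p.1, p.2 + 1) from rfl]
        rw [show (p.1, p.2 + 1) = ((pvStep p "U").1, (pvStep p "U").2) by
              simp [pvStep, pvDelta_U]]
        rw [ih]
        simp [pvAddC, pvAddM, pvEnd, pvStep, pvDelta_U]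
      · rw [show pvStepA (c, mel, p.1, p.2) m = (c, mel, p.1, p.2) by
              simp [pvStepA, hL, hR, hD, hU]]
        rw [show (p.1, p.2) = ((pvStep p m).1, (pvStep p m).2) by
              simp [pvStep, pvDelta_other m hL hR hD hU]]
        rw [ih]
        simp [pvAddC, pvAddM, pvEnd, pvStep, pvDelta_other m hL hR hD hU, hL, hR, hD, hU]

-- ===== VERDICT (by name: the statement is the Claim_ definition above) =====
theorem calculate_visited_spec : Claim_equal_calculate_visited := by
  intro movements _
  unfold Spec_calculate_visited calculate_visited calculate_visited_alt
  rw [show ((0 : Int), (0 : Int)) = (((0, 0) : Int × Int).1, ((0, 0) : Int × Int).2) from rfl,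
      pvFoldA movements [] [] (0, 0), pvFoldB movements [] (0, 0)]
  simp
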